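-- pv_equiv track=rewrite | github.com/data7expressions/opencv-process | expression/core.py | getChars
-- ===== SOURCE A (Python) =====
-- def getChars(string):
--     isString=False
--     quotes=None
--     result =[]
--     for p in list(string):
--         if isString and p == quotes: isString=False
--         elif not isString and (p == '\'' or p=='"'):
--             isString=True
--             quotes=p
--         if p != ' ' or isString:
--            result.append(p)
--     return result
-- ===== SOURCE B (Python) =====
-- def getChars(string):
--     result = []
--     i = 0
--     n = len(string)
--     while i < n:
--         c = string[i]
--         if c == "'" or c == '"':
--             result.append(c)
--             i += 1
--             while i < n and string[i] != c:
--                 result.append(string[i])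
--                 i += 1
--             if i < n:
--                 result.append(string[i])
--                 i += 1
--         elif c != ' ':
--             result.append(c)
--             i += 1
--         else:
--             i += 1
--     return result
-- ===== Notes on version B (the rewrite author's own statement) =====
-- stated objective: alternative
-- what changed: Replaces the per-character boolean flag/quote-state machine with an index-driven loop that, on seeing a quote, consumes the whole quoted segment in a dedicated inner while loop up to the matching quote (or end of string).
import Mathlib
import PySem

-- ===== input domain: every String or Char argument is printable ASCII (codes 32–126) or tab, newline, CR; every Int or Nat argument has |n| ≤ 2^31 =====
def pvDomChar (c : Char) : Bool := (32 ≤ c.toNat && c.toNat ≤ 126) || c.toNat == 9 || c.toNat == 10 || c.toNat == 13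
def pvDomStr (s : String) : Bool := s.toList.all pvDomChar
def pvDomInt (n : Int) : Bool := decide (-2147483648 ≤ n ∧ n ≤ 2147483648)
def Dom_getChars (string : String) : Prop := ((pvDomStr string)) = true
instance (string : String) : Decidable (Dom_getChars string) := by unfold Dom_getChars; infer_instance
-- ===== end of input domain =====

-- B replaces A's boolean-flag state machine by an index-driven scan that consumes
-- each quoted segment in a dedicated inner loop; same cost, different decomposition.
-- ===== PORT A =====
def stepA (st : Bool × Option Char × List String) (p : Char) : Bool × Option Char × List String :=
  let isString := st.1
  let quotes := st.2.1
  let result := st.2.2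
  let st' : Bool × Option Char :=
    if isString ∧ quotes = some p then (false, quotes)
    else if (¬ isString) ∧ (p = '\'' ∨ p = '"') then (true, some p)
    else (isString, quotes)
  if p ≠ ' ' ∨ st'.1 then (st'.1, st'.2, result ++ [p.toString]) else (st'.1, st'.2, result)

def getChars (string : String) : List String :=
  (string.toList.foldl stepA (false, none, [])).2.2

-- ===== PORT B =====
mutual
def gcScan : List Char → List String
  | [] => []
  | c :: rest =>
    if c = '\'' ∨ c = '"' then c.toString :: gcQuoted c rest
    else if c = ' ' then gcScan rest
    else c.toString :: gcScan rest
def gcQuoted (q : Char) : List Char → List String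
  | [] => []
  | c :: rest => if c = q then c.toString :: gcScan rest else c.toString :: gcQuoted q rest
end

def getChars_alt (string : String) : List String := gcScan string.toList

-- ===== PRECONDITION & SPEC =====
def Spec_getChars (string : String) (out : List String) : Prop := out = getChars_alt string
instance (string : String) (out : List String) : Decidable (Spec_getChars string out) := by unfold Spec_getChars; infer_instance

-- ===== CLAIM (what is proved, stated in full; the proofs are below) =====
def Claim_equal_getChars : Prop := ∀ (string : String), Dom_getChars string → Spec_getChars string (getChars string)

-- ===== LEMMAS AND PROOFS =====

-- ===== VERDICT (by name: the statement is the Claim_ definition above) =====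
lemma gc_loop : ∀ (l : List Char),
    (∀ (acc : List String) (qs : Option Char),
      (l.foldl stepA (false, qs, acc)).2.2 = acc ++ gcScan l)
    ∧ (∀ (acc : List String) (q : Char), q ≠ ' ' →
      (l.foldl stepA (true, some q, acc)).2.2 = acc ++ gcQuoted q l) := by
  intro l
  induction l with
  | nil => simp [gcScan, gcQuoted]
  | cons c rest ih =>
    obtain ⟨ih1, ih2⟩ := ih
    constructor
    · intro acc qs
      by_cases hq : c = '\'' ∨ c = '"'
      · have hcs : c ≠ ' ' := by rcases hq with h | h <;> subst h <;> decide
        simp [List.foldl, stepA, hq, hcs, gcScan, ih2 _ c hcs]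
      · by_cases hs : c = ' '
        · simp [List.foldl, stepA, hs, gcScan, ih1]
        · simp [List.foldl, stepA, hq, hs, gcScan, ih1]
    · intro acc q hq
      by_cases hc : c = q
      · subst hc
        simp [List.foldl, stepA, hq, gcQuoted, ih1]
      · have : ¬ (q = c) := fun h => hc h.symm
        simp [List.foldl, stepA, this, hc, gcQuoted, ih2 _ q hq]

theorem getChars_spec : Claim_equal_getChars := by
  intro s _
  unfold Spec_getChars getChars getChars_alt
  simpa using (gc_loop s.toList).1 [] none
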